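-- pv_equiv track=rewrite | github.com/matthewmckenna/advent2017 | day11.py | cancel_terms
-- ===== SOURCE A (Python) =====
-- from collections import Counter
-- from typing import List, Tuple
--
-- COMBINING_TERMS = {
--     ('n', 'se'): 'ne',
--     ('ne', 's'): 'se',
--     ('se', 'sw'): 's',
--     ('s', 'nw'): 'sw',
--     ('sw', 'n'): 'nw',
--     ('nw', 'ne'): 'n',
-- }
--
-- def cancel_terms(l: List[str], pairs: List[Tuple[str, str]], combine: bool = False) -> List[str]:
--     for pair in pairs:
--         c = Counter(l)
--         terms = min(c[pair[0]], c[pair[1]])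
--
--         for _ in range(terms):
--             l.remove(pair[0])
--             l.remove(pair[1])
--             if combine:
--                 l.append(COMBINING_TERMS[pair])
--
--     return l
-- ===== SOURCE B (Python) =====
-- from typing import List, Tuple
--
-- COMBINING_TERMS = {
--     ('n', 'se'): 'ne',
--     ('ne', 's'): 'se',
--     ('se', 'sw'): 's',
--     ('s', 'nw'): 'sw',
--     ('sw', 'n'): 'nw',
--     ('nw', 'ne'): 'n',
-- }
--
-- def cancel_terms(l: List[str], pairs: List[Tuple[str, str]], combine: bool = False) -> List[str]:
--     # One filtering pass per pair instead of repeated list.remove scans.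
--     out = list(l)
--     for pair in pairs:
--         n = min(out.count(pair[0]), out.count(pair[1]))
--         if n:
--             na = nb = n
--             kept = []
--             for x in out:
--                 if x == pair[0] and na > 0:
--                     na -= 1
--                 elif x == pair[1] and nb > 0:
--                     nb -= 1
--                 else:
--                     kept.append(x)
--             out = kept
--             if combine:
--                 out.extend([COMBINING_TERMS[pair]] * n)
--     return out
-- ===== Notes on version B (the rewrite author's own statement) =====
-- stated objective: faster
-- what changed: Each pair is handled by one counting step plus a single filtering pass that skips the first n occurrences of each element and appends the n combined terms at the end, instead of A's n rounds of list.remove (each a linear scan plus shift).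
-- outside the precondition, e.g. on cancel_terms([], [('n', 'n')], True): A returns [], B returns []; on cancel_terms(['ne'], [('ne', 'n')], True): A returns ['ne'], B returns ['ne']
import Mathlib
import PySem

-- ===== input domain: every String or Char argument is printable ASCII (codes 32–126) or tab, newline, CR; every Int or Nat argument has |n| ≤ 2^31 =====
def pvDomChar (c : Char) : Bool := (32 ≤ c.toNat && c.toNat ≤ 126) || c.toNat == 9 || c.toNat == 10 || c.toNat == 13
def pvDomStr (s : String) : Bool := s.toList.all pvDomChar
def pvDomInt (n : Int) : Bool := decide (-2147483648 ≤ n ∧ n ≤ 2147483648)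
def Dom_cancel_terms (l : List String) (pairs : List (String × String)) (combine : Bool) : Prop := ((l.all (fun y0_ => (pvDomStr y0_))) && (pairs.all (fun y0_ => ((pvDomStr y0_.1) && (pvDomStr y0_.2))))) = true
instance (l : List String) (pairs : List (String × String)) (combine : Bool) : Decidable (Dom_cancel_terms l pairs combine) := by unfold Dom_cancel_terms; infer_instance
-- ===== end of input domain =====

-- B replaces A's per-pair `terms` rounds of list.remove (quadratic) by one filtering pass per pair
-- (objective: faster). Equivalence is about the RETURN value only: Python A mutates `l` in place, B does not.

-- ===== PORT A =====
-- module constant COMBINING_TERMS (a dict keyed by string pairs)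
def pvCombining : PySem.Dict (String × String) String :=
  PySem.Dict.ofList [(("n","se"),"ne"), (("ne","s"),"se"), (("se","sw"),"s"),
                     (("s","nw"),"sw"), (("sw","n"),"nw"), (("nw","ne"),"n")]

-- A's inner `for _ in range(terms)` loop; `none` exactly where Python raises (ValueError / KeyError)
def pvInnerA (p : String × String) (combine : Bool) : Nat → List String → Option (List String)
  | 0, cur => some cur
  | t+1, cur =>
    (PySem.List.remove? cur p.1).bind fun c1 =>
    (PySem.List.remove? c1 p.2).bind fun c2 =>
    (if combine then (pvCombining.get? p).map (fun cmb => c2 ++ [cmb]) else some c2).bind fun c3 =>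
    pvInnerA p combine t c3

-- one iteration of A's outer `for pair in pairs` loop: c = Counter(l); terms = min(c[p0], c[p1]); inner loop
def pvStepA (combine : Bool) (cur : List String) (p : String × String) : Option (List String) :=
  let c := PySem.Dict.counter cur
  let terms : Int := min (c.getD p.1 0) (c.getD p.2 0)
  pvInnerA p combine terms.toNat cur

def cancel_terms (l : List String) (pairs : List (String × String)) (combine : Bool) : List String :=
  (pairs.foldl (fun acc p => acc.bind (fun cur => pvStepA combine cur p)) (some l)).getD []

-- ===== PORT B =====
-- body of B's single filtering pass (the `for x in out` loop); state = (kept, na, nb)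
def pvStepF (a b : String) (acc : List String × Int × Int) (x : String) : List String × Int × Int :=
  if x = a ∧ acc.2.1 > 0 then (acc.1, acc.2.1 - 1, acc.2.2)
  else if x = b ∧ acc.2.2 > 0 then (acc.1, acc.2.1, acc.2.2 - 1)
  else (acc.1 ++ [x], acc.2)

def pvPassB (a b : String) (n : Int) (out : List String) : List String × Int × Int :=
  out.foldl (pvStepF a b) ([], n, n)

-- one iteration of B's outer loop; `none` exactly where Python raises (KeyError)
def pvStepB (combine : Bool) (out : List String) (p : String × String) : Option (List String) :=
  let n : Int := min ((PySem.List.count out p.1 : Int)) ((PySem.List.count out p.2 : Int))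
  if n ≠ 0 then
    let kept := (pvPassB p.1 p.2 n out).1
    if combine then (pvCombining.get? p).map (fun cmb => kept ++ List.replicate n.toNat cmb)
    else some kept
  else some out

def cancel_terms_alt (l : List String) (pairs : List (String × String)) (combine : Bool) : List String :=
  (pairs.foldl (fun acc p => acc.bind (fun cur => pvStepB combine cur p)) (some l)).getD []

-- ===== PRECONDITION & SPEC =====
def pvDirs : List String := ["ne", "se", "s", "sw", "nw", "n"]
def pvKeys : List (String × String) :=
  [("n","se"), ("ne","s"), ("se","sw"), ("s","nw"), ("sw","n"), ("nw","ne")]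

-- Pre_ excludes the inputs on which A raises: a pair with equal components whose element occurs in the
-- (evolving) list makes `l.remove` raise ValueError, and with combine=True a pair outside COMBINING_TERMS
-- whose two components both occur raises KeyError.  Because removals only delete elements and combining only
-- appends values from pvDirs, 'occurs' is over-approximated closed-form by membership in l or (when combine)
-- in pvDirs — this conservatively also excludes some inputs on which A returns (see cites in claim.json).
def Pre_cancel_terms (l : List String) (pairs : List (String × String)) (combine : Bool) : Prop :=
  ∀ p ∈ pairs,
    (p.1 = p.2 → p.1 ∉ l ∧ (combine = true → p.1 ∉ pvDirs)) ∧
    (combine = true → p ∈ pvKeys ∨ (p.1 ∉ l ∧ p.1 ∉ pvDirs) ∨ (p.2 ∉ l ∧ p.2 ∉ pvDirs))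
instance (l : List String) (pairs : List (String × String)) (combine : Bool) : Decidable (Pre_cancel_terms l pairs combine) := by unfold Pre_cancel_terms; infer_instance

def pvWitness_cancel_terms : List String × (List (String × String)) × Bool :=
  (["n", "se", "se", "sw"], [("n","se"), ("se","sw")], true)

def Spec_cancel_terms (l : List String) (pairs : List (String × String)) (combine : Bool) (out : List String) : Prop := out = cancel_terms_alt l pairs combine
instance (l : List String) (pairs : List (String × String)) (combine : Bool) (out : List String) : Decidable (Spec_cancel_terms l pairs combine out) := by unfold Spec_cancel_terms; infer_instance

-- ===== CLAIM (what is proved, stated in full; the proofs are below) =====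
def Claim_equal_cancel_terms : Prop := ∀ (l : List String) (pairs : List (String × String)) (combine : Bool), Dom_cancel_terms l pairs combine → Pre_cancel_terms l pairs combine → Spec_cancel_terms l pairs combine (cancel_terms l pairs combine)

-- ===== LEMMAS AND PROOFS =====

-- `dN a n xs` drops the first n occurrences of a from xs (the common spec of both sides' removals)
def dN (a : String) : Nat → List String → List String
  | 0, xs => xs
  | _+1, [] => []
  | n+1, x :: xs => if x = a then dN a n xs else x :: dN a (n+1) xs

lemma dN_nil (a : String) (n : Nat) : dN a n [] = [] := by cases n <;> rfl

lemma dN_zero (a : String) (xs : List String) : dN a 0 xs = xs := by cases xs <;> simp [dN]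

lemma dN_cons_ne {a x : String} (h : x ≠ a) (n : Nat) (xs : List String) :
    dN a n (x :: xs) = x :: dN a n xs := by cases n <;> simp [dN, h]

lemma dN_cons_self (a : String) (n : Nat) (xs : List String) :
    dN a (n+1) (a :: xs) = dN a n xs := by simp [dN]

lemma mem_dN {x a : String} : ∀ {n : Nat} {xs : List String}, x ∈ dN a n xs → x ∈ xs := by
  intro n xs
  induction xs generalizing n with
  | nil => simp [dN_nil]
  | cons y ys IH =>
    cases n with
    | zero => exact fun h => h
    | succ k =>
      by_cases hy : y = a
      · subst hy
        rw [dN_cons_self]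
        exact fun h => List.mem_cons_of_mem _ (IH h)
      · rw [dN_cons_ne hy]
        intro h
        rcases List.mem_cons.mp h with rfl | h
        · exact List.mem_cons_self
        · exact List.mem_cons_of_mem _ (IH h)

lemma count_dN_self (a : String) : ∀ (n : Nat) (xs : List String),
    (dN a n xs).count a = xs.count a - n := by
  intro n xs
  induction xs generalizing n with
  | nil => simp [dN_nil]
  | cons y ys IH =>
    cases n with
    | zero => simp [dN]
    | succ k =>
      by_cases hy : y = a
      · subst hy
        rw [dN_cons_self, IH k]
        simp [List.count_cons]
      · rw [dN_cons_ne hy]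
        simp [List.count_cons, hy, IH]

lemma count_dN_ne {c a : String} (h : c ≠ a) : ∀ (n : Nat) (xs : List String),
    (dN a n xs).count c = xs.count c := by
  intro n xs
  induction xs generalizing n with
  | nil => simp [dN_nil]
  | cons y ys IH =>
    cases n with
    | zero => simp [dN]
    | succ k =>
      by_cases hy : y = a
      · subst hy
        rw [dN_cons_self, IH k]
        simp [List.count_cons, Ne.symm h]
      · rw [dN_cons_ne hy]
        simp [List.count_cons, IH]

lemma erase_eq_dN (a : String) : ∀ xs : List String, xs.erase a = dN a 1 xs := by
  intro xs
  induction xs with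
  | nil => rfl
  | cons y ys IH =>
    by_cases hy : y = a
    · subst hy; simp [dN]
    · rw [dN_cons_ne hy, List.erase_cons]
      simp [hy, IH]

lemma dN_dN_one (a : String) : ∀ (n : Nat) (xs : List String),
    dN a n (dN a 1 xs) = dN a (n+1) xs := by
  intro n xs
  induction xs generalizing n with
  | nil => simp [dN_nil]
  | cons y ys IH =>
    by_cases hy : y = a
    · subst hy; simp [dN]
    · rw [dN_cons_ne hy 1, dN_cons_ne hy (n+1)]
      cases n with
      | zero => rfl
      | succ k => rw [dN_cons_ne hy (k+1), IH]

lemma dN_one_comm {a b : String} (h : a ≠ b) : ∀ (n : Nat) (xs : List String),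
    dN a n (dN b 1 xs) = dN b 1 (dN a n xs) := by
  intro n xs
  induction xs generalizing n with
  | nil => simp [dN_nil]
  | cons y ys IH =>
    cases n with
    | zero => rw [dN_zero, dN_zero]
    | succ k =>
      by_cases hyb : y = b
      · subst hyb
        rw [show dN y 1 (y :: ys) = ys from by rw [dN_cons_self, dN_zero],
            dN_cons_ne (Ne.symm h) (k+1),
            show dN y 1 (y :: dN a (k+1) ys) = dN a (k+1) ys from by rw [dN_cons_self, dN_zero]]
      · by_cases hya : y = a
        · subst hya
          rw [dN_cons_ne hyb 1, dN_cons_self, dN_cons_self, IH k]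
        · rw [dN_cons_ne hyb 1, dN_cons_ne hya (k+1), dN_cons_ne hya (k+1), dN_cons_ne hyb 1,
              IH (k+1)]

lemma dN_append_ne {c a : String} (h : c ≠ a) : ∀ (n : Nat) (xs : List String),
    dN a n (xs ++ [c]) = dN a n xs ++ [c] := by
  intro n xs
  induction xs generalizing n with
  | nil => simp [dN_nil, dN_cons_ne h]
  | cons y ys IH =>
    cases n with
    | zero => rfl
    | succ k =>
      by_cases hy : y = a
      · subst hy; simp [dN, IH]
      · simp only [List.cons_append, dN_cons_ne hy, IH]

lemma mem_of_count_pos {a : String} {xs : List String} {n : Nat} (h : n + 1 ≤ xs.count a) :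
    a ∈ xs := List.count_pos_iff.mp (by omega)

lemma innerA_false {p : String × String} (hab : p.1 ≠ p.2) :
    ∀ (n : Nat) (xs : List String), n ≤ xs.count p.1 → n ≤ xs.count p.2 →
    pvInnerA p false n xs = some (dN p.2 n (dN p.1 n xs)) := by
  intro n
  induction n with
  | zero => intro xs _ _; simp [pvInnerA, dN_zero]
  | succ k IH =>
    intro xs h1 h2
    have ha : p.1 ∈ xs := mem_of_count_pos h1
    have hb : p.2 ∈ dN p.1 1 xs := by
      refine List.count_pos_iff.mp ?_
      rw [count_dN_ne hab.symm]; omega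
    rw [pvInnerA, PySem.List.remove?_eq_some_erase _ _ ha, erase_eq_dN]
    rw [Option.bind_some, PySem.List.remove?_eq_some_erase _ _ hb, erase_eq_dN]
    simp only [Bool.false_eq_true, if_false, Option.bind_some]
    rw [IH]
    · rw [dN_one_comm hab, dN_dN_one, dN_dN_one]
    · rw [count_dN_ne hab, count_dN_self]; omega
    · rw [count_dN_self, count_dN_ne hab.symm]; omega

lemma innerA_true {p : String × String} {cmb : String} (hab : p.1 ≠ p.2)
    (hca : cmb ≠ p.1) (hcb : cmb ≠ p.2) (hget : pvCombining.get? p = some cmb) :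
    ∀ (n : Nat) (xs : List String), n ≤ xs.count p.1 → n ≤ xs.count p.2 →
    pvInnerA p true n xs = some (dN p.2 n (dN p.1 n xs) ++ List.replicate n cmb) := by
  intro n
  induction n with
  | zero => intro xs _ _; simp [pvInnerA, dN_zero]
  | succ k IH =>
    intro xs h1 h2
    have ha : p.1 ∈ xs := mem_of_count_pos h1
    have hb : p.2 ∈ dN p.1 1 xs := by
      refine List.count_pos_iff.mp ?_
      rw [count_dN_ne hab.symm]; omega
    rw [pvInnerA, PySem.List.remove?_eq_some_erase _ _ ha, erase_eq_dN]
    rw [Option.bind_some, PySem.List.remove?_eq_some_erase _ _ hb, erase_eq_dN]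
    simp only [if_true, hget, Option.map_some, Option.bind_some]
    rw [IH]
    · rw [dN_append_ne hca, dN_append_ne hcb, dN_one_comm hab, dN_dN_one, dN_dN_one]
      simp [List.replicate_succ]
    · rw [List.count_append, count_dN_ne hab, count_dN_self]
      simp [List.count_singleton]
      omega
    · rw [List.count_append, count_dN_self, count_dN_ne hab.symm]
      simp [List.count_singleton]
      omega

lemma stepF_eval (a b x : String) (acc : List String) (i j : Int) :
    pvStepF a b (acc, i, j) x =
      if x = a ∧ i > 0 then (acc, i-1, j)
      else if x = b ∧ j > 0 then (acc, i, j-1)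
      else (acc ++ [x], i, j) := rfl

lemma passB_factor (a b : String) : ∀ (xs : List String) (acc : List String) (i j : Int),
    xs.foldl (pvStepF a b) (acc, i, j) =
      (acc ++ (xs.foldl (pvStepF a b) ([], i, j)).1, (xs.foldl (pvStepF a b) ([], i, j)).2) := by
  intro xs
  induction xs with
  | nil => intro acc i j; simp
  | cons x xs IH =>
    intro acc i j
    simp only [List.foldl_cons, stepF_eval]
    by_cases h1 : x = a ∧ i > 0
    · rw [if_pos h1, if_pos h1]
      exact IH acc (i-1) j
    · by_cases h2 : x = b ∧ j > 0
      · rw [if_neg h1, if_pos h2, if_neg h1, if_pos h2]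
        exact IH acc i (j-1)
      · rw [if_neg h1, if_neg h2, if_neg h1, if_neg h2]
        rw [IH (acc ++ [x]) i j, IH ([] ++ [x]) i j]
        simp

lemma passB_spec {a b : String} (hab : a ≠ b) : ∀ (xs : List String) (i j : Nat),
    (xs.foldl (pvStepF a b) ([], (i : Int), (j : Int))).1 = dN b j (dN a i xs) := by
  intro xs
  induction xs with
  | nil => intro i j; simp [dN_nil]
  | cons x xs IH =>
    intro i j
    rw [List.foldl_cons, stepF_eval]
    by_cases hxa : x = a
    · subst hxa
      cases i with
      | zero =>
        rw [if_neg (by simp), if_neg (by simp [hab]), passB_factor]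
        simp only [List.nil_append]
        rw [IH 0 j, dN_zero, dN_zero, dN_cons_ne hab j]
        rfl
      | succ k =>
        rw [if_pos ⟨rfl, by positivity⟩,
            show (((k+1:Nat):Int) - 1) = ((k:Nat):Int) from by push_cast; ring,
            IH k j, dN_cons_self]
    · by_cases hxb : x = b
      · subst hxb
        cases j with
        | zero =>
          rw [if_neg (by simp [hxa]), if_neg (by simp), passB_factor]
          simp only [List.nil_append]
          rw [IH i 0, dN_zero, dN_zero, dN_cons_ne hxa i]
          rfl
        | succ k =>
          rw [if_neg (by simp [hxa]), if_pos ⟨rfl, by positivity⟩,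
              show (((k+1:Nat):Int) - 1) = ((k:Nat):Int) from by push_cast; ring,
              IH i k, dN_cons_ne hxa i, dN_cons_self]
      · rw [if_neg (by simp [hxa]), if_neg (by simp [hxb]), passB_factor]
        simp only [List.nil_append]
        rw [IH i j, dN_cons_ne hxa i, dN_cons_ne hxb j]
        rfl

lemma combining_of_mem {p : String × String} (hp : p ∈ pvKeys) :
    ∃ cmb, pvCombining.get? p = some cmb ∧ cmb ∈ pvDirs ∧ cmb ≠ p.1 ∧ cmb ≠ p.2 := by
  simp only [pvKeys, List.mem_cons, List.not_mem_nil, or_false] at hp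
  rcases hp with rfl | rfl | rfl | rfl | rfl | rfl
  · exact ⟨"ne", by decide⟩
  · exact ⟨"se", by decide⟩
  · exact ⟨"s", by decide⟩
  · exact ⟨"sw", by decide⟩
  · exact ⟨"nw", by decide⟩
  · exact ⟨"n", by decide⟩

lemma step_eq {l : List String} {combine : Bool} {p : String × String}
    (hp1 : p.1 = p.2 → p.1 ∉ l ∧ (combine = true → p.1 ∉ pvDirs))
    (hp2 : combine = true → p ∈ pvKeys ∨ (p.1 ∉ l ∧ p.1 ∉ pvDirs) ∨ (p.2 ∉ l ∧ p.2 ∉ pvDirs))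
    {cur : List String} (hcur : ∀ x ∈ cur, x ∈ l ∨ (combine = true ∧ x ∈ pvDirs)) :
    ∃ cur', pvStepA combine cur p = some cur' ∧ pvStepB combine cur p = some cur' ∧
      ∀ x ∈ cur', x ∈ l ∨ (combine = true ∧ x ∈ pvDirs) := by
  have hA : pvStepA combine cur p =
      pvInnerA p combine (min (cur.count p.1) (cur.count p.2)) cur := by
    simp only [pvStepA, PySem.Dict.getD_counter]
    congr 1
    omega
  have hBn : (min ((PySem.List.count cur p.1 : Int)) ((PySem.List.count cur p.2 : Int))) =
      ((min (cur.count p.1) (cur.count p.2) : Nat) : Int) := by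
    simp only [PySem.List.count_eq]
    omega
  set m : Nat := min (cur.count p.1) (cur.count p.2) with hm
  rcases Nat.eq_zero_or_pos m with hm0 | hmpos
  · -- nothing to cancel: both sides return cur unchanged
    refine ⟨cur, ?_, ?_, hcur⟩
    · rw [hA, hm0]; rfl
    · simp only [pvStepB, hBn, hm0]
      simp
  · have hmne : ((m : Nat) : Int) ≠ 0 := Int.natCast_ne_zero.mpr hmpos.ne'
    have hca : 0 < cur.count p.1 := lt_of_lt_of_le hmpos (by omega)
    have hcb : 0 < cur.count p.2 := lt_of_lt_of_le hmpos (by omega)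
    have hab : p.1 ≠ p.2 := by
      intro he
      rcases hcur p.1 (List.count_pos_iff.mp hca) with hl | ⟨hc, hd⟩
      · exact (hp1 he).1 hl
      · exact (hp1 he).2 hc hd
    have hm1 : m ≤ cur.count p.1 := by omega
    have hm2 : m ≤ cur.count p.2 := by omega
    have hinv : ∀ x ∈ dN p.2 m (dN p.1 m cur), x ∈ l ∨ (combine = true ∧ x ∈ pvDirs) :=
      fun x hx => hcur x (mem_dN (mem_dN hx))
    cases combine with
    | false =>
      refine ⟨dN p.2 m (dN p.1 m cur), ?_, ?_, hinv⟩
      · rw [hA, innerA_false hab m cur hm1 hm2]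
      · simp only [pvStepB, hBn]
        rw [if_pos hmne]
        simp only [Bool.false_eq_true, if_false, pvPassB]
        rw [passB_spec hab cur m m]
    | true =>
      have hkey : p ∈ pvKeys := by
        rcases hp2 rfl with hk | ⟨h1, h2⟩ | ⟨h1, h2⟩
        · exact hk
        · exfalso
          rcases hcur p.1 (List.count_pos_iff.mp hca) with hl | ⟨_, hd⟩
          · exact h1 hl
          · exact h2 hd
        · exfalso
          rcases hcur p.2 (List.count_pos_iff.mp hcb) with hl | ⟨_, hd⟩
          · exact h1 hl
          · exact h2 hd
      obtain ⟨cmb, hget, hdir, hne1, hne2⟩ := combining_of_mem hkey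
      refine ⟨dN p.2 m (dN p.1 m cur) ++ List.replicate m cmb, ?_, ?_, ?_⟩
      · rw [hA, innerA_true hab hne1 hne2 hget m cur hm1 hm2]
      · simp only [pvStepB, hBn]
        rw [if_pos hmne]
        simp only [if_true, hget, Option.map_some, pvPassB]
        rw [passB_spec hab cur m m]
        simp
      · intro x hx
        rcases List.mem_append.mp hx with hx | hx
        · exact hinv x hx
        · right
          exact ⟨rfl, by rw [List.eq_of_mem_replicate hx]; exact hdir⟩

lemma fold_eq {l : List String} {combine : Bool} :
    ∀ (pairs : List (String × String)) (cur : List String),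
    (∀ p ∈ pairs,
      (p.1 = p.2 → p.1 ∉ l ∧ (combine = true → p.1 ∉ pvDirs)) ∧
      (combine = true → p ∈ pvKeys ∨ (p.1 ∉ l ∧ p.1 ∉ pvDirs) ∨ (p.2 ∉ l ∧ p.2 ∉ pvDirs))) →
    (∀ x ∈ cur, x ∈ l ∨ (combine = true ∧ x ∈ pvDirs)) →
    pairs.foldl (fun acc p => acc.bind (fun c => pvStepA combine c p)) (some cur) =
      pairs.foldl (fun acc p => acc.bind (fun c => pvStepB combine c p)) (some cur) := by
  intro pairs
  induction pairs with
  | nil => intro cur _ _; rfl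
  | cons p ps IH =>
    intro cur hpre hinv
    obtain ⟨cur', hA, hB, hinv'⟩ :=
      step_eq (hpre p List.mem_cons_self).1 (hpre p List.mem_cons_self).2 hinv
    simp only [List.foldl_cons, Option.bind_some, hA, hB]
    exact IH cur' (fun q hq => hpre q (List.mem_cons_of_mem _ hq)) hinv'

-- ===== VERDICT (by name: the statement is the Claim_ definition above) =====
theorem cancel_terms_spec : Claim_equal_cancel_terms := by
  intro l pairs combine _hdom hpre
  unfold Spec_cancel_terms cancel_terms cancel_terms_alt
  rw [fold_eq pairs l hpre (fun x hx => Or.inl hx)]
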